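-- pv_equiv track=rewrite | github.com/Ksatura/heximap | main/4_rasterize/ras_export.py | _face_neighbors
-- ===== SOURCE A (Python) =====
-- def _face_neighbors(fi, faces, max_n=15):
--     """Yüz fi'nin komşu yüzlerini döndürür."""
--     verts_fi = set(faces[fi])
--     nbrs = []
--     for i, f in enumerate(faces):
--         if i == fi:
--             continue
--         if len(verts_fi & set(f)) > 0:
--             nbrs.append(i)
--         if len(nbrs) >= max_n:
--             break
--     return [fi] + nbrs[:max_n - 1]
-- ===== SOURCE B (Python) =====
-- def _face_neighbors(fi, faces, max_n=15):
--     """Yüz fi'nin komşu yüzlerini döndürür."""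
--     index = {}
--     for i, f in enumerate(faces):
--         for v in f:
--             index.setdefault(v, []).append(i)
--     nbrs = set()
--     for v in faces[fi]:
--         nbrs.update(index[v])
--     nbrs.discard(fi)
--     return [fi] + sorted(nbrs)[:max(max_n - 1, 0)]
-- ===== Notes on version B (the rewrite author's own statement) =====
-- stated objective: alternative
-- what changed: B builds an inverted vertex-to-face-index map in one pass and takes the union of the index lists of faces[fi]'s vertices (a set), sorts it and truncates to max_n-1, instead of A's scan over every face with a set intersection and an early break.
import Mathlib
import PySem

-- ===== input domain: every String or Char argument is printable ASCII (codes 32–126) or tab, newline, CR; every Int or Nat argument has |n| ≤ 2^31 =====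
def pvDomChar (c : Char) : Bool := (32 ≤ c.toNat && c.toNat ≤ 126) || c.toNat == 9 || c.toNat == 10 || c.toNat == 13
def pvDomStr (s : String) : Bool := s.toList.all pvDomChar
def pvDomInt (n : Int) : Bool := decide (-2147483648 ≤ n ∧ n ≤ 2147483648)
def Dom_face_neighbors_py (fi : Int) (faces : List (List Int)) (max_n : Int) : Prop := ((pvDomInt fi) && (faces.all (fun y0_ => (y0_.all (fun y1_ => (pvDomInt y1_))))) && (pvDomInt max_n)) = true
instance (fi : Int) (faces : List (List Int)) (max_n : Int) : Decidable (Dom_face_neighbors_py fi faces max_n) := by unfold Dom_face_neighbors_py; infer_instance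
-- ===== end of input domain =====

-- B replaces A's scan of every face (set intersection with faces[fi], early break) by an
-- inverted vertex→face-indices map built once, then a sorted, truncated union; same return value.

-- ===== PORT A =====
-- the loop 'for i, f in enumerate(faces): …' with its early break at len(nbrs) >= max_n
def pvALoop (fi max_n : Int) (verts : PySem.Set Int) : List (Int × List Int) → List Int → List Int
  | [], nbrs => nbrs
  | (i, f) :: rest, nbrs =>
    if i = fi then pvALoop fi max_n verts rest nbrs
    else
      let nbrs' := if 0 < PySem.Set.len (PySem.Set.inter verts (PySem.Set.ofList f)) then nbrs ++ [i] else nbrs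
      if max_n ≤ (nbrs'.length : Int) then nbrs' else pvALoop fi max_n verts rest nbrs'

def face_neighbors_py (fi : Int) (faces : List (List Int)) (max_n : Int) : List Int :=
  match PySem.List.pyGet? faces fi with
  | none => []  -- faces[fi] raises IndexError; excluded by Pre_
  | some ffi =>
    fi :: PySem.List.slice (pvALoop fi max_n (PySem.Set.ofList ffi) (PySem.List.enumerate faces 0) []) none (some (max_n - 1))

-- ===== PORT B =====
-- 'for i, f in enumerate(faces): for v in f: index.setdefault(v, []).append(i)'
-- (setdefault+append in place is Dict.modify with default []: d[v] = d.get(v, []) + [i], key position kept)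
def pvBIndex (faces : List (List Int)) : PySem.Dict Int (List Int) :=
  (PySem.List.enumerate faces 0).foldl
    (fun d p => p.2.foldl (fun d v => d.modify v [] (fun l => l ++ [p.1])) d)
    PySem.Dict.empty

def face_neighbors_py_alt (fi : Int) (faces : List (List Int)) (max_n : Int) : List Int :=
  match PySem.List.pyGet? faces fi with
  | none => []  -- faces[fi] raises IndexError; excluded by Pre_
  | some ffi =>
    let index := pvBIndex faces
    -- 'nbrs = set(); for v in faces[fi]: nbrs.update(index[v]); nbrs.discard(fi)'
    -- (index[v] never misses: every v of faces[fi] was indexed; exact as getD v [])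
    let nbrs := PySem.Set.discard (ffi.foldl (fun s v => PySem.Set.update s (index.getD v [])) PySem.Set.empty) fi
    fi :: PySem.List.slice (PySem.List.sorted nbrs (fun x => x) false) none (some (max (max_n - 1) 0))

-- ===== PRECONDITION & SPEC =====
-- Pre_ excludes exactly the inputs where A raises IndexError on faces[fi]
def Pre_face_neighbors_py (fi : Int) (faces : List (List Int)) (max_n : Int) : Prop :=
  PySem.Raise.InRange faces.length fi
instance (fi : Int) (faces : List (List Int)) (max_n : Int) : Decidable (Pre_face_neighbors_py fi faces max_n) := by unfold Pre_face_neighbors_py; infer_instance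

def pvWitness_face_neighbors_py : Int × List (List Int) × Int := (0, ([[1, 2], [2, 3], [4]], 15))

def Spec_face_neighbors_py (fi : Int) (faces : List (List Int)) (max_n : Int) (out : List Int) : Prop := out = face_neighbors_py_alt fi faces max_n
instance (fi : Int) (faces : List (List Int)) (max_n : Int) (out : List Int) : Decidable (Spec_face_neighbors_py fi faces max_n out) := by unfold Spec_face_neighbors_py; infer_instance

-- ===== CLAIM (what is proved, stated in full; the proofs are below) =====
def Claim_equal_face_neighbors_py : Prop := ∀ (fi : Int) (faces : List (List Int)) (max_n : Int), Dom_face_neighbors_py fi faces max_n → Pre_face_neighbors_py fi faces max_n → Spec_face_neighbors_py fi faces max_n (face_neighbors_py fi faces max_n)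

-- ===== LEMMAS AND PROOFS =====

-- the ascending list of neighbor indices: the common normal form of both ports
def pvFilt (fi : Int) (ffi : List Int) (l : List (Int × List Int)) : List Int :=
  (l.filter (fun p => decide (p.1 ≠ fi ∧ ∃ v ∈ ffi, v ∈ p.2))).map (·.1)

-- the (vertex, face-index) pairs B's index loop inserts, in order
def pvPairs (faces : List (List Int)) : List (Int × Int) :=
  (PySem.List.enumerate faces 0).flatMap (fun p => p.2.map (fun v => (v, p.1)))

-- A's append condition len(verts_fi & set(f)) > 0 is 'some vertex is shared'
lemma pvCondA (ffi f : List Int) :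
    (0 < PySem.Set.len (PySem.Set.inter (PySem.Set.ofList ffi) (PySem.Set.ofList f))) ↔
      ∃ v ∈ ffi, v ∈ f := by
  simp [PySem.Set.len, Int.natCast_pos, List.length_pos_iff_exists_mem,
    PySem.Set.mem_inter, PySem.Set.mem_ofList]

-- A's break-at-max_n loop collects the first (max_n - len nbrs) filtered indices
lemma pvALoop_eq (fi max_n : Int) (ffi : List Int) :
    ∀ (l : List (Int × List Int)) (nbrs : List Int), (nbrs.length : Int) < max_n →
    pvALoop fi max_n (PySem.Set.ofList ffi) l nbrs
      = nbrs ++ (pvFilt fi ffi l).take (max_n - nbrs.length).toNat := by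
  intro l
  induction l with
  | nil => intro nbrs h; simp [pvALoop, pvFilt]
  | cons p rest ih =>
    obtain ⟨i, f⟩ := p
    intro nbrs h
    by_cases hif : i = fi
    · rw [show pvALoop fi max_n (PySem.Set.ofList ffi) ((i, f) :: rest) nbrs
          = pvALoop fi max_n (PySem.Set.ofList ffi) rest nbrs by simp [pvALoop, hif]]
      rw [ih nbrs h]
      simp [pvFilt, hif]
    · by_cases hc : ∃ v ∈ ffi, v ∈ f
      · have hcb : (0 < ((PySem.Set.ofList ffi).inter (PySem.Set.ofList f)).length) := by
          have := (pvCondA ffi f).2 hc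
          simpa [PySem.Set.len, Int.natCast_pos] using this
        have hfilt : pvFilt fi ffi ((i, f) :: rest) = i :: pvFilt fi ffi rest := by
          simp [pvFilt, hif, hc]
        by_cases hbr : max_n ≤ ((nbrs ++ [i]).length : Int)
        · rw [show pvALoop fi max_n (PySem.Set.ofList ffi) ((i, f) :: rest) nbrs
              = nbrs ++ [i] by
                have hbr' : max_n ≤ (nbrs.length : Int) + 1 := by simpa using hbr
                simp [pvALoop, hif, hcb, hbr']]
          rw [hfilt]
          have h1 : (max_n - nbrs.length).toNat = 1 := by
            simp at hbr; omega
          simp [h1]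
        · rw [show pvALoop fi max_n (PySem.Set.ofList ffi) ((i, f) :: rest) nbrs
              = pvALoop fi max_n (PySem.Set.ofList ffi) rest (nbrs ++ [i]) by
                have hbr' : ¬ max_n ≤ (nbrs.length : Int) + 1 := by simpa using hbr
                simp [pvALoop, hif, hcb, hbr']]
          have h2 : ((nbrs ++ [i]).length : Int) < max_n := by simp at hbr ⊢; omega
          rw [ih (nbrs ++ [i]) h2, hfilt]
          have h3 : (max_n - nbrs.length).toNat = (max_n - (nbrs ++ [i]).length).toNat + 1 := by
            simp at hbr ⊢; omega
          simp [h3]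
      · have hcb : ¬ (0 < ((PySem.Set.ofList ffi).inter (PySem.Set.ofList f)).length) := by
          intro hx
          exact hc ((pvCondA ffi f).1 (by simpa [PySem.Set.len, Int.natCast_pos] using hx))
        have hfilt : pvFilt fi ffi ((i, f) :: rest) = pvFilt fi ffi rest := by
          simp [pvFilt, hif, hc]
        by_cases hbr : max_n ≤ (nbrs.length : Int)
        · omega
        · rw [show pvALoop fi max_n (PySem.Set.ofList ffi) ((i, f) :: rest) nbrs
              = pvALoop fi max_n (PySem.Set.ofList ffi) rest nbrs by simp [pvALoop, hif, hcb, hbr]]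
          rw [ih nbrs h, hfilt]

-- with max_n ≤ 0 the loop breaks at the first non-fi face: at most one element
lemma pvALoop_short (fi max_n : Int) (verts : PySem.Set Int) (hm : max_n ≤ 0) :
    ∀ (l : List (Int × List Int)), (pvALoop fi max_n verts l []).length ≤ 1 := by
  intro l
  induction l with
  | nil => simp [pvALoop]
  | cons p rest ih =>
    obtain ⟨i, f⟩ := p
    by_cases hif : i = fi
    · simpa [pvALoop, hif] using ih
    · by_cases hcb : 0 < (verts.inter (PySem.Set.ofList f)).length
      · simp [pvALoop, hif, hcb]
        rw [if_pos (by omega)]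
        simp
      · simp [pvALoop, hif, hcb]
        rw [if_pos (by omega)]
        simp

-- l[:b] with b ≤ -1 on a list of length ≤ 1 is empty
lemma pvSlice_short {l : List Int} {b : Int} (hl : l.length ≤ 1) (hb : b ≤ -1) :
    PySem.List.slice l none (some b) = [] := by
  obtain ⟨k, hk1, hk2⟩ : ∃ k : Nat, 0 < k ∧ b = -(k : Int) := ⟨(-b).toNat, by omega, by omega⟩
  subst hk2
  rw [PySem.List.slice_to_neg_natCast l k hk1]
  have : l.length - k = 0 := by omega
  simp [this]

-- the nested index loop is the flat loop over the (vertex, face) pairs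
lemma pvNested_eq_flat (L : List (Int × List Int)) :
    ∀ d : PySem.Dict Int (List Int),
    L.foldl (fun d p => p.2.foldl (fun d v => d.modify v [] (fun l => l ++ [p.1])) d) d
      = (L.flatMap (fun p => p.2.map (fun v => (v, p.1)))).foldl
          (fun d q => d.modify q.1 [] (fun l => l ++ [q.2])) d := by
  induction L with
  | nil => intro d; simp
  | cons p rest ih =>
    intro d
    simp only [List.foldl_cons, List.flatMap_cons, List.foldl_append, List.foldl_map]
    rw [ih]

lemma pvBIndex_getD (faces : List (List Int)) (v : Int) :
    (pvBIndex faces).getD v [] = ((pvPairs faces).filter (fun q => q.1 == v)).map (·.2) := by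
  rw [pvBIndex, pvNested_eq_flat, ← pvPairs]
  simpa using PySem.Dict.getD_foldl_modify_append (pvPairs faces) PySem.Dict.empty v

lemma pvMem_index (faces : List (List Int)) (v y : Int) :
    y ∈ (pvBIndex faces).getD v [] ↔
      ∃ k : Nat, ∃ h : k < faces.length, v ∈ faces[k] ∧ y = (k : Int) := by
  rw [pvBIndex_getD]
  simp [pvPairs, List.mem_flatMap, PySem.List.mem_enumerate_iff]
  constructor
  · rintro ⟨k, hk, hy⟩; exact ⟨k, hk, hy.symm⟩
  · rintro ⟨k, hk, hy⟩; exact ⟨k, hk, hy.symm⟩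

lemma pvMem_collect (faces : List (List Int)) :
    ∀ (ffi : List Int) (s : PySem.Set Int) (y : Int),
      y ∈ ffi.foldl (fun s v => PySem.Set.update s ((pvBIndex faces).getD v [])) s ↔
        y ∈ s ∨ ∃ v ∈ ffi, y ∈ (pvBIndex faces).getD v [] := by
  intro ffi
  induction ffi with
  | nil => intro s y; simp
  | cons v rest ih =>
    intro s y
    simp only [List.foldl_cons]
    rw [ih]
    rw [PySem.Set.mem_update]
    simp only [List.mem_cons]
    constructor
    · rintro ((h | h) | ⟨w, hw, hy⟩)
      · exact Or.inl h
      · exact Or.inr ⟨v, Or.inl rfl, h⟩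
      · exact Or.inr ⟨w, Or.inr hw, hy⟩
    · rintro (h | ⟨w, (rfl | hw), hy⟩)
      · exact Or.inl (Or.inl h)
      · exact Or.inl (Or.inr hy)
      · exact Or.inr ⟨w, hw, hy⟩

lemma pvNodup_collect (faces : List (List Int)) :
    ∀ (ffi : List Int) (s : PySem.Set Int), s.Nodup →
      (ffi.foldl (fun s v => PySem.Set.update s ((pvBIndex faces).getD v [])) s).Nodup := by
  intro ffi
  induction ffi with
  | nil => intro s h; exact h
  | cons v rest ih =>
    intro s h
    exact ih _ (PySem.Set.nodup_update s ((pvBIndex faces).getD v []) h)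

lemma pvMem_filt (fi : Int) (ffi : List Int) (faces : List (List Int)) (y : Int) :
    y ∈ pvFilt fi ffi (PySem.List.enumerate faces 0) ↔
      ∃ k : Nat, ∃ h : k < faces.length, (k : Int) ≠ fi ∧ (∃ v ∈ ffi, v ∈ faces[k]) ∧ y = (k : Int) := by
  simp [pvFilt, List.mem_filter, PySem.List.mem_enumerate_iff]
  constructor
  · rintro ⟨k, rfl, hne, hk, hv⟩
    exact ⟨k, hne, ⟨hk, hv⟩, rfl⟩
  · rintro ⟨k, hne, ⟨hk, hv⟩, rfl⟩
    exact ⟨k, rfl, hne, hk, hv⟩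

lemma pvPairwise_filt (fi : Int) (ffi : List Int) (faces : List (List Int)) :
    (pvFilt fi ffi (PySem.List.enumerate faces 0)).Pairwise (· < ·) := by
  have h := PySem.List.pairwise_lt_enumerate faces (0 : Int)
  rw [pvFilt, List.pairwise_map]
  exact (h.filter _).imp (fun hab => hab)

-- B's sorted neighbor set IS the ascending filtered index list
lemma pvMain (fi : Int) (ffi : List Int) (faces : List (List Int)) :
    PySem.List.sorted
      (PySem.Set.discard
        (ffi.foldl (fun s v => PySem.Set.update s ((pvBIndex faces).getD v [])) PySem.Set.empty) fi)
      (fun x => x) false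
      = pvFilt fi ffi (PySem.List.enumerate faces 0) := by
  apply PySem.List.sorted_eq_of_perm_of_pairwise_lt
  · apply (List.perm_ext_iff_of_nodup ?_ ?_).2
    · intro y
      rw [pvMem_filt, PySem.Set.mem_discard, pvMem_collect]
      constructor
      · rintro ⟨k, hk, hne, hv, rfl⟩
        refine ⟨Or.inr ?_, hne⟩
        obtain ⟨v, hv1, hv2⟩ := hv
        exact ⟨v, hv1, (pvMem_index faces v _).2 ⟨k, hk, hv2, rfl⟩⟩
      · rintro ⟨(h | ⟨v, hv1, hv2⟩), hne⟩
        · simp [PySem.Set.empty] at h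
        · obtain ⟨k, hk, hvk, rfl⟩ := (pvMem_index faces v _).1 hv2
          exact ⟨k, hk, hne, ⟨v, hv1, hvk⟩, rfl⟩
    · exact (pvPairwise_filt fi ffi faces).imp (fun h => ne_of_lt h)
    · exact PySem.Set.nodup_discard _ _ (pvNodup_collect faces ffi _ (by simp [PySem.Set.empty]))
  · exact pvPairwise_filt fi ffi faces

-- ===== VERDICT (by name: the statement is the Claim_ definition above) =====
theorem face_neighbors_py_spec : Claim_equal_face_neighbors_py := by
  intro fi faces max_n _hdom hpre
  unfold Spec_face_neighbors_py
  obtain ⟨ffi, hget⟩ : ∃ ffi, PySem.List.pyGet? faces fi = some ffi := by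
    cases hg : PySem.List.pyGet? faces fi with
    | none => exact absurd ((PySem.List.pyGet?_eq_none_iff faces fi).1 hg) (not_not_intro hpre)
    | some x => exact ⟨x, rfl⟩
  unfold face_neighbors_py face_neighbors_py_alt
  rw [hget]
  simp only
  congr 1
  rw [pvMain fi ffi faces]
  by_cases hm : 1 ≤ max_n
  · rw [pvALoop_eq fi max_n ffi (PySem.List.enumerate faces 0) [] (by simpa using hm)]
    simp only [List.nil_append, List.length_nil, Nat.cast_zero, Int.sub_zero]
    rw [PySem.List.slice_to _ (by omega : (0:Int) ≤ max_n - 1)]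
    rw [PySem.List.slice_to _ (by omega : (0:Int) ≤ max (max_n - 1) 0)]
    rw [List.take_take]
    congr 1
    omega
  · rw [pvSlice_short (pvALoop_short fi max_n _ (by omega) _) (by omega)]
    rw [PySem.List.slice_to _ (by omega : (0:Int) ≤ max (max_n - 1) 0)]
    have : (max (max_n - 1) 0).toNat = 0 := by omega
    simp [this]
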